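-- pv_equiv track=rewrite | github.com/poxiao01/ahh | src/data/dependency_parsers.py | map_question_word_positions_to_relations
-- ===== SOURCE A (Python) =====
-- def map_question_word_positions_to_relations(word, dependency_relations):
--     """
--     映射给定词在各种依存关系中的位置至相应的位置标记列表中。
--
--     该函数遍历给定的依存关系列表，检查给定词是否作为关系的头部词汇或依存词汇出现，
--     并记录每种依存关系类型（如'NUMMOD', 'OBL_TMOD'等）中给定词的位置。结果是一个列表，
--     列表中的每个元素对应于'all_pos'列表中的一个依存关系类型，值为1表示给定词位于关系的头部，
--     值为2表示给定词是依存词汇，值为0表示给定词未出现在该类型的依存关系中。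
--
--     :param question_word: str, 分析的目标给定词
--     :param dependency_relations: list of tuples, 每个元组包含关系类型和一个元组(头部词汇, 依存词汇)
--     :return: list, 给定词在所有可能依存关系类型中的位置标记列表
--     """
--     # 定义所有可能的依存关系类型
--     all_relations = [
--         'NUMMOD', 'OBL_TMOD', 'ADVCL', 'OBL_AGENT', 'CONJ', 'OBL', 'CC',
--         'OBL_NPMOD', 'CC_PRECONJ', 'COP', 'NMOD_POSSESS', 'PUNCT', 'XCOMP',
--         'EXPL', 'AUX', 'OBJ', 'ACL', 'CCOMP', 'ACL_RELCL', 'DEP', 'APPOS',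
--         'NSUBJ_PASS', 'FLAT', 'CASE', 'AMOD', 'ROOT', 'NMOD_NPMOD', 'AUX_PASS',
--         'MARK', 'ADVCL_RELCL', 'ADVMOD', 'NMOD', 'IOBJ', 'DET_PREDET', 'FIXED',
--         'DET', 'COMPOUND', 'NSUBJ'
--     ]
--     # 收集给定词出现的关系及位置信息
--     detected_relations = set()
--
--     for rel, (head, dep) in dependency_relations:
--         if word in (head, dep):
--             position = 1 if head == word else 2
--             detected_relations.add((rel.upper().replace(':', '_'), position))
--
--     # 初始化结果列表，根据所有可能的依存关系类型填充
--     position_markers = []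
--     for relation in all_relations:
--         if (relation, 1) in detected_relations:
--             position_markers.append(1)
--         elif (relation, 2) in detected_relations:
--             position_markers.append(2)
--         else:
--             position_markers.append(0)
--     return position_markers
-- ===== SOURCE B (Python) =====
-- def map_question_word_positions_to_relations(word, dependency_relations):
--     all_relations = [
--         'NUMMOD', 'OBL_TMOD', 'ADVCL', 'OBL_AGENT', 'CONJ', 'OBL', 'CC',
--         'OBL_NPMOD', 'CC_PRECONJ', 'COP', 'NMOD_POSSESS', 'PUNCT', 'XCOMP',
--         'EXPL', 'AUX', 'OBJ', 'ACL', 'CCOMP', 'ACL_RELCL', 'DEP', 'APPOS',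
--         'NSUBJ_PASS', 'FLAT', 'CASE', 'AMOD', 'ROOT', 'NMOD_NPMOD', 'AUX_PASS',
--         'MARK', 'ADVCL_RELCL', 'ADVMOD', 'NMOD', 'IOBJ', 'DET_PREDET', 'FIXED',
--         'DET', 'COMPOUND', 'NSUBJ'
--     ]
--     # No intermediate index at all: for each relation type, scan the relation
--     # list directly; a head occurrence wins (1), otherwise a dep occurrence (2).
--     result = []
--     for relation in all_relations:
--         matches = [hd for rel, hd in dependency_relations
--                    if rel.upper().replace(':', '_') == relation]
--         if any(head == word for head, _ in matches):
--             result.append(1)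
--         elif any(dep == word for _, dep in matches):
--             result.append(2)
--         else:
--             result.append(0)
--     return result
-- ===== Notes on version B (the rewrite author's own statement) =====
-- stated objective: alternative
-- what changed: B builds no intermediate set/dict at all: instead of A's single pass that records (relation, position) pairs and a membership readout, B scans the dependency list once per relation type (filter by normalized name, then 'any head match' else 'any dep match'), trading A's O(n+k) index build for direct per-relation O(n*k) scans.
import Mathlib
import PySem

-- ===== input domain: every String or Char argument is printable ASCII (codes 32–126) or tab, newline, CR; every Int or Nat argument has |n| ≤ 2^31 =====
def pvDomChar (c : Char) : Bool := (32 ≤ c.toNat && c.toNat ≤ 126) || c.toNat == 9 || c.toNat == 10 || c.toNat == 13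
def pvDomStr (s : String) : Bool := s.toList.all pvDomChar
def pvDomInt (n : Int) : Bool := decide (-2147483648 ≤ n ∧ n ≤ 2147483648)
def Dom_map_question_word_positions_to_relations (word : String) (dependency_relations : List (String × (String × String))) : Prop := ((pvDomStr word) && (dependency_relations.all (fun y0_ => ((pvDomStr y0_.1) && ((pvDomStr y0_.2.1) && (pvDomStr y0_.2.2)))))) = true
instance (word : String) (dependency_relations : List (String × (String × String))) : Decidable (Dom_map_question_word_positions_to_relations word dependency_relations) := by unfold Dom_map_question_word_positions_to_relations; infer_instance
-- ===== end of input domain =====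

-- B builds no intermediate set: per relation type it scans the dependency list
-- directly (head match -> 1, else dep match -> 2, else 0); objective: alternative.

-- shared constant: the literal list both Pythons define
def pvAllRelations : List String := [
  "NUMMOD", "OBL_TMOD", "ADVCL", "OBL_AGENT", "CONJ", "OBL", "CC",
  "OBL_NPMOD", "CC_PRECONJ", "COP", "NMOD_POSSESS", "PUNCT", "XCOMP",
  "EXPL", "AUX", "OBJ", "ACL", "CCOMP", "ACL_RELCL", "DEP", "APPOS",
  "NSUBJ_PASS", "FLAT", "CASE", "AMOD", "ROOT", "NMOD_NPMOD", "AUX_PASS",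
  "MARK", "ADVCL_RELCL", "ADVMOD", "NMOD", "IOBJ", "DET_PREDET", "FIXED",
  "DET", "COMPOUND", "NSUBJ"]

-- rel.upper().replace(':', '_')
def pvNorm (rel : String) : String := PySem.Str.replace (PySem.Str.upper rel) ":" "_"

-- ===== PORT A =====
def map_question_word_positions_to_relations (word : String) (dependency_relations : List (String × (String × String))) : List Int :=
  let detected : PySem.Set (String × Int) :=
    dependency_relations.foldl (fun s t =>
      let rel := t.1
      let head := t.2.1
      let dep := t.2.2
      if word == head || word == dep then
        let position : Int := if head == word then 1 else 2
        PySem.Set.add s (pvNorm rel, position)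
      else s) PySem.Set.empty
  pvAllRelations.foldl (fun acc relation =>
    acc ++ [if PySem.Set.contains detected (relation, (1 : Int)) then (1 : Int)
            else if PySem.Set.contains detected (relation, (2 : Int)) then 2
            else 0]) []

-- ===== PORT B =====
def map_question_word_positions_to_relations_alt (word : String) (dependency_relations : List (String × (String × String))) : List Int :=
  pvAllRelations.map (fun relation =>
    let ms : List (String × String) :=
      (dependency_relations.filter (fun t => pvNorm t.1 == relation)).map (fun t => t.2)
    if ms.any (fun hd => hd.1 == word) then (1 : Int)
    else if ms.any (fun hd => hd.2 == word) then 2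
    else 0)

-- ===== PRECONDITION & SPEC =====
def Spec_map_question_word_positions_to_relations (word : String) (dependency_relations : List (String × (String × String))) (out : List Int) : Prop := out = map_question_word_positions_to_relations_alt word dependency_relations
instance (word : String) (dependency_relations : List (String × (String × String))) (out : List Int) : Decidable (Spec_map_question_word_positions_to_relations word dependency_relations out) := by unfold Spec_map_question_word_positions_to_relations; infer_instance

-- ===== CLAIM =====
def Claim_equal_map_question_word_positions_to_relations : Prop := ∀ (word : String) (dependency_relations : List (String × (String × String))), Dom_map_question_word_positions_to_relations word dependency_relations → Spec_map_question_word_positions_to_relations word dependency_relations (map_question_word_positions_to_relations word dependency_relations)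

-- ===== LEMMAS AND PROOFS =====

-- A's accumulation step, named for the lemmas below
def pvStep (word : String) (s : PySem.Set (String × Int)) (t : String × (String × String)) : PySem.Set (String × Int) :=
  if word == t.2.1 || word == t.2.2 then
    PySem.Set.add s (pvNorm t.1, if t.2.1 == word then 1 else 2)
  else s

-- membership in one accumulation step
theorem pv_mem_step (word : String) (S : PySem.Set (String × Int))
    (t : String × (String × String)) (r : String) (p : Int) :
    ((r, p) ∈ pvStep word S t) ↔
      ((r, p) ∈ S ∨ ((word = t.2.1 ∨ word = t.2.2) ∧
        r = pvNorm t.1 ∧ p = (if t.2.1 = word then 1 else 2))) := by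
  unfold pvStep
  split
  · rename_i hcond
    rw [PySem.Set.mem_add]
    constructor
    · rintro (h | h)
      · exact Or.inl h
      · refine Or.inr ⟨?_, ?_, ?_⟩
        · simpa [beq_iff_eq] using hcond
        · exact congrArg Prod.fst h
        · have hsnd := congrArg Prod.snd h
          by_cases heq : t.2.1 = word <;> simp [heq] at hsnd ⊢ <;> exact hsnd
    · rintro (h | ⟨_, hr, hp⟩)
      · exact Or.inl h
      · refine Or.inr ?_
        rw [Prod.ext_iff]
        refine ⟨hr, ?_⟩
        by_cases heq : t.2.1 = word <;> simp [heq] at hp ⊢ <;> exact hp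
  · rename_i hcond
    constructor
    · exact Or.inl
    · rintro (h | ⟨hw, _⟩)
      · exact h
      · exact absurd (by simpa [beq_iff_eq] using hw) (by simpa [beq_iff_eq, not_or] using hcond)

-- membership in A's accumulated set, characterised over the input list
theorem pv_mem_fold (word : String) (l : List (String × (String × String)))
    (S : PySem.Set (String × Int)) (r : String) (p : Int) :
    ((r, p) ∈ l.foldl (pvStep word) S) ↔
      ((r, p) ∈ S ∨ ∃ t ∈ l, (word = t.2.1 ∨ word = t.2.2) ∧
        r = pvNorm t.1 ∧ p = (if t.2.1 = word then 1 else 2)) := by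
  induction l generalizing S with
  | nil => simp
  | cons t l ih =>
    simp only [List.foldl_cons, ih, pv_mem_step, List.mem_cons]
    constructor
    · rintro ((h | h) | ⟨u, hu, hc⟩)
      · exact Or.inl h
      · exact Or.inr ⟨t, Or.inl rfl, h⟩
      · exact Or.inr ⟨u, Or.inr hu, hc⟩
    · rintro (h | ⟨u, hu | hu, hc⟩)
      · exact Or.inl (Or.inl h)
      · subst hu; exact Or.inl (Or.inr hc)
      · exact Or.inr ⟨u, hu, hc⟩

-- A's readout loop is a map
theorem pv_foldl_append_map (g : String → Int) (l : List String) (acc : List Int) :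
    l.foldl (fun a r => a ++ [g r]) acc = acc ++ l.map g := by
  induction l generalizing acc with
  | nil => simp
  | cons x l ih => simp [ih]

theorem pv_contains_iff {S : PySem.Set (String × Int)} {x : String × Int} :
    PySem.Set.contains S x = true ↔ x ∈ S := by
  simp [PySem.Set.contains]

-- ===== VERDICT =====
theorem map_question_word_positions_to_relations_spec : Claim_equal_map_question_word_positions_to_relations := by
  intro word drs _
  unfold Spec_map_question_word_positions_to_relations
  unfold map_question_word_positions_to_relations map_question_word_positions_to_relations_alt
  rw [pv_foldl_append_map]
  simp only [List.nil_append]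
  apply List.map_congr_left
  intro r _
  have e : (List.foldl
      (fun (s : PySem.Set (String × Int)) (t : String × (String × String)) =>
        if word == t.2.1 || word == t.2.2 then
          PySem.Set.add s (pvNorm t.1, if t.2.1 == word then (1 : Int) else 2)
        else s) PySem.Set.empty drs) = List.foldl (pvStep word) PySem.Set.empty drs := rfl
  rw [e]
  have hc1 : PySem.Set.contains (drs.foldl (pvStep word) PySem.Set.empty) (r, (1 : Int)) = true ↔
      (∃ t ∈ drs, r = pvNorm t.1 ∧ t.2.1 = word) := by
    rw [pv_contains_iff, pv_mem_fold]
    simp only [PySem.Set.empty, List.not_mem_nil, false_or]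
    constructor
    · rintro ⟨t, ht, hw, hr, hp⟩
      by_cases he : t.2.1 = word
      · exact ⟨t, ht, hr, he⟩
      · simp [he] at hp
    · rintro ⟨t, ht, hr, he⟩
      exact ⟨t, ht, Or.inl he.symm, hr, by simp [he]⟩
  have hc2 : PySem.Set.contains (drs.foldl (pvStep word) PySem.Set.empty) (r, (2 : Int)) = true ↔
      (∃ t ∈ drs, r = pvNorm t.1 ∧ t.2.2 = word ∧ t.2.1 ≠ word) := by
    rw [pv_contains_iff, pv_mem_fold]
    simp only [PySem.Set.empty, List.not_mem_nil, false_or]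
    constructor
    · rintro ⟨t, ht, hw, hr, hp⟩
      by_cases he : t.2.1 = word
      · simp [he] at hp
      · refine ⟨t, ht, hr, ?_, he⟩
        rcases hw with hw | hw
        · exact absurd hw.symm he
        · exact hw.symm
    · rintro ⟨t, ht, hr, hd, he⟩
      exact ⟨t, ht, Or.inr hd.symm, hr, by simp [he]⟩
  have hb1 : ((drs.filter (fun t => pvNorm t.1 == r)).map (fun t => t.2)).any
      (fun hd => hd.1 == word) = true ↔ (∃ t ∈ drs, r = pvNorm t.1 ∧ t.2.1 = word) := by
    simp only [List.any_eq_true, List.mem_map, List.mem_filter, beq_iff_eq]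
    constructor
    · rintro ⟨hd, ⟨t, ⟨ht, hnorm⟩, hmap⟩, hw⟩
      refine ⟨t, ht, hnorm.symm, ?_⟩
      rw [hmap]; exact hw
    · rintro ⟨t, ht, hr, he⟩
      exact ⟨t.2, ⟨t, ⟨ht, hr.symm⟩, rfl⟩, he⟩
  have hb2 : ((drs.filter (fun t => pvNorm t.1 == r)).map (fun t => t.2)).any
      (fun hd => hd.2 == word) = true ↔ (∃ t ∈ drs, r = pvNorm t.1 ∧ t.2.2 = word) := by
    simp only [List.any_eq_true, List.mem_map, List.mem_filter, beq_iff_eq]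
    constructor
    · rintro ⟨hd, ⟨t, ⟨ht, hnorm⟩, hmap⟩, hw⟩
      refine ⟨t, ht, hnorm.symm, ?_⟩
      rw [hmap]; exact hw
    · rintro ⟨t, ht, hr, he⟩
      exact ⟨t.2, ⟨t, ⟨ht, hr.symm⟩, rfl⟩, he⟩
  by_cases h1 : (∃ t ∈ drs, r = pvNorm t.1 ∧ t.2.1 = word)
  · rw [if_pos (hc1.mpr h1), if_pos (hb1.mpr h1)]
  · rw [if_neg (fun h => h1 (hc1.mp h)), if_neg (fun h => h1 (hb1.mp h))]
    by_cases h2 : (∃ t ∈ drs, r = pvNorm t.1 ∧ t.2.2 = word)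
    · obtain ⟨t, ht, hr, hd⟩ := h2
      have hne : t.2.1 ≠ word := fun he => h1 ⟨t, ht, hr, he⟩
      rw [if_pos (hc2.mpr ⟨t, ht, hr, hd, hne⟩), if_pos (hb2.mpr ⟨t, ht, hr, hd⟩)]
    · rw [if_neg (fun h => h2 (by obtain ⟨t, ht, hr, hd, _⟩ := hc2.mp h; exact ⟨t, ht, hr, hd⟩)),
         if_neg (fun h => h2 (hb2.mp h))]
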